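-- pv_equiv track=rewrite | github.com/Blindripper/MrAster | brackets_guard.py | _classify_orders
-- ===== SOURCE A (Python) =====
-- from typing import Dict, Optional, Tuple, List
--
-- def _classify_orders(orders: List[dict]) -> Tuple[Optional[dict], Optional[dict]]:
--     stop, tp = None, None
--     for o in orders or []:
--         ty = str(o.get("type", "")).upper()
--         if "STOP" in ty and "TAKE" not in ty:
--             stop = o
--         elif "TAKE_PROFIT" in ty:
--             tp = o
--     return stop, tp
-- ===== SOURCE B (Python) =====
-- def _classify_orders(orders):
--     def is_stop(o):
--         ty = str(o.get("type", "")).upper()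
--         return "STOP" in ty and "TAKE" not in ty
--     def is_tp(o):
--         ty = str(o.get("type", "")).upper()
--         return "TAKE_PROFIT" in ty
--     rev = list(reversed(orders or []))
--     stop = next((o for o in rev if is_stop(o)), None)
--     tp = next((o for o in rev if is_tp(o)), None)
--     return stop, tp
-- ===== Notes on version B (the rewrite author's own statement) =====
-- stated objective: alternative
-- what changed: Replaces the forward overwrite-during-scan loop by scanning the reversed list and taking the FIRST matching stop / take-profit order (first-match-on-reverse instead of last-overwrite-on-forward).
import Mathlib
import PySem

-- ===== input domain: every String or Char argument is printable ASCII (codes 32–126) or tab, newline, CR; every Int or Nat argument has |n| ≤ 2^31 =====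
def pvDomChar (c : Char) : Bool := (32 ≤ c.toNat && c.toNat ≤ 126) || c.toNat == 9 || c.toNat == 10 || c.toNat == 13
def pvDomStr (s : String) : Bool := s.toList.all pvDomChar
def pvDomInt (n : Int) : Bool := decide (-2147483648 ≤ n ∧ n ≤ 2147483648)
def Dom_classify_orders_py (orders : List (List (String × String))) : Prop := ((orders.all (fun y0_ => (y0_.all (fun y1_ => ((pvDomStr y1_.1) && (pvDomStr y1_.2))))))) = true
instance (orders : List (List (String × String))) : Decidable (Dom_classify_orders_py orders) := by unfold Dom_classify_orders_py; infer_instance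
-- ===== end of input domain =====

-- B scans the reversed list and takes the first matching stop / take-profit order, instead of
-- A's forward overwrite-during-scan loop (alternative decomposition, same cost).

-- ===== PORT A =====
def classify_orders_py (orders : List (List (String × String))) :
    (Option (List (String × String))) × (Option (List (String × String))) :=
  orders.foldl (fun st o =>
    let ty := PySem.Str.upper ((PySem.Dict.mk o).getD "type" "")
    if PySem.Str.isIn "STOP" ty && !(PySem.Str.isIn "TAKE" ty) then (some o, st.2)
    else if PySem.Str.isIn "TAKE_PROFIT" ty then (st.1, some o)
    else st) (none, none)

-- ===== PORT B =====
def pvIsStop (o : List (String × String)) : Bool :=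
  let ty := PySem.Str.upper ((PySem.Dict.mk o).getD "type" "")
  PySem.Str.isIn "STOP" ty && !(PySem.Str.isIn "TAKE" ty)

def pvIsTp (o : List (String × String)) : Bool :=
  let ty := PySem.Str.upper ((PySem.Dict.mk o).getD "type" "")
  PySem.Str.isIn "TAKE_PROFIT" ty

def classify_orders_py_alt (orders : List (List (String × String))) :
    (Option (List (String × String))) × (Option (List (String × String))) :=
  let rev := orders.reverse
  (rev.find? pvIsStop, rev.find? pvIsTp)

-- ===== PRECONDITION & SPEC =====
def Spec_classify_orders_py (orders : List (List (String × String))) (out : (Option (List (String × String))) × (Option (List (String × String)))) : Prop := out = classify_orders_py_alt orders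
instance (orders : List (List (String × String))) (out : (Option (List (String × String))) × (Option (List (String × String)))) : Decidable (Spec_classify_orders_py orders out) := by unfold Spec_classify_orders_py; infer_instance

-- ===== CLAIM (what is proved, stated in full; the proofs are below) =====
def Claim_equal_classify_orders_py : Prop := ∀ (orders : List (List (String × String))), Dom_classify_orders_py orders → Spec_classify_orders_py orders (classify_orders_py orders)

-- ===== LEMMAS AND PROOFS =====

-- "TAKE_PROFIT" in ty implies "TAKE" in ty
theorem take_of_take_profit (ty : String) (h : PySem.Str.isIn "TAKE_PROFIT" ty = true) :
    PySem.Str.isIn "TAKE" ty = true := by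
  simp only [PySem.Str.isIn_eq] at h ⊢
  rw [PySem.Chars.isIn_iff_infix] at h ⊢
  exact List.IsInfix.trans (by decide : "TAKE".toList <:+: "TAKE_PROFIT".toList) h

-- A's loop body, phrased through B's two predicates
theorem stepA_eq (st : (Option (List (String × String))) × (Option (List (String × String))))
    (o : List (String × String)) :
    (let ty := PySem.Str.upper ((PySem.Dict.mk o).getD "type" "")
     if PySem.Str.isIn "STOP" ty && !(PySem.Str.isIn "TAKE" ty) then (some o, st.2)
     else if PySem.Str.isIn "TAKE_PROFIT" ty then (st.1, some o)
     else st)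
    = if pvIsStop o then (some o, st.2) else if pvIsTp o then (st.1, some o) else st := rfl

-- a stop order (per A's test) is never a take-profit order
theorem tp_false_of_stop (o : List (String × String)) (h : pvIsStop o = true) :
    pvIsTp o = false := by
  simp only [pvIsStop, Bool.and_eq_true, Bool.not_eq_true'] at h
  cases hp : pvIsTp o with
  | false => rfl
  | true =>
    simp only [pvIsTp] at hp
    have ht := take_of_take_profit _ hp
    rw [h.2] at ht
    exact absurd ht Bool.false_ne_true

-- loop invariant: A's fold from any accumulator (s, t) equals first-match on the reverse,
-- falling back to s / t when no element matches
theorem fold_eq_find_rev (l : List (List (String × String)))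
    (s t : Option (List (String × String))) :
    l.foldl (fun st o =>
      if pvIsStop o then (some o, st.2) else if pvIsTp o then (st.1, some o) else st) (s, t)
    = ((l.reverse.find? pvIsStop).or s, (l.reverse.find? pvIsTp).or t) := by
  induction l generalizing s t with
  | nil => simp
  | cons a l ih =>
    simp only [List.foldl_cons, List.reverse_cons, List.find?_append]
    by_cases h1 : pvIsStop a = true
    · have h2 := tp_false_of_stop a h1
      rw [if_pos h1, ih,
        List.find?_cons_of_pos (l := []) h1,
        List.find?_cons_of_neg (l := []) (by rw [h2]; exact Bool.false_ne_true),
        List.find?_nil]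
      cases l.reverse.find? pvIsStop <;> cases l.reverse.find? pvIsTp <;> simp
    · rw [if_neg h1]
      by_cases h2 : pvIsTp a = true
      · rw [if_pos h2, ih,
          List.find?_cons_of_neg (l := []) h1, List.find?_nil,
          List.find?_cons_of_pos (l := []) h2]
        cases l.reverse.find? pvIsStop <;> cases l.reverse.find? pvIsTp <;> simp
      · rw [if_neg h2, ih,
          List.find?_cons_of_neg (l := []) h1,
          List.find?_cons_of_neg (l := []) h2, List.find?_nil]
        cases l.reverse.find? pvIsStop <;> cases l.reverse.find? pvIsTp <;> simp

-- ===== VERDICT (by name: the statement is the Claim_ definition above) =====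
theorem classify_orders_py_spec : Claim_equal_classify_orders_py := by
  intro orders _
  unfold Spec_classify_orders_py classify_orders_py classify_orders_py_alt
  simp only [stepA_eq]
  rw [fold_eq_find_rev]
  simp
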